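-- pv_equiv track=rewrite | github.com/SHArdowYT/prosperity | trader.py | find_popular_sum_length
-- ===== SOURCE A (Python) =====
-- def find_popular_sum_length(orders, ask_mode: bool):
--     prices = []
--     ask_volume = 0
--     for price, volume in list(orders):
--         if ((volume < ask_volume) and ask_mode) or ((volume > ask_volume) and not ask_mode):
--             prices = [price]
--         elif volume == ask_volume:
--             prices.append(price)
--
--     # prices_sum = sum(prices)
--     # prices_length = len(prices)
--     return sum(prices), len(prices)
-- ===== SOURCE B (Python) =====
-- def find_popular_sum_length(orders, ask_mode: bool):
--     # Walk the orders in reverse, accumulating zero-volume prices, and stop at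
--     # the first "reset" element (which also contributes its price).
--     total = 0
--     count = 0
--     for price, volume in reversed(list(orders)):
--         if (volume < 0 and ask_mode) or (volume > 0 and not ask_mode):
--             total += price
--             count += 1
--             break
--         if volume == 0:
--             total += price
--             count += 1
--     return total, count
-- ===== Notes on version B (the rewrite author's own statement) =====
-- stated objective: alternative
-- what changed: B scans the list backwards with a running (sum, count) accumulator and stops early at the first reset element, instead of A's forward pass that rebuilds/extends a price list and then sums it.
import Mathlib
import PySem

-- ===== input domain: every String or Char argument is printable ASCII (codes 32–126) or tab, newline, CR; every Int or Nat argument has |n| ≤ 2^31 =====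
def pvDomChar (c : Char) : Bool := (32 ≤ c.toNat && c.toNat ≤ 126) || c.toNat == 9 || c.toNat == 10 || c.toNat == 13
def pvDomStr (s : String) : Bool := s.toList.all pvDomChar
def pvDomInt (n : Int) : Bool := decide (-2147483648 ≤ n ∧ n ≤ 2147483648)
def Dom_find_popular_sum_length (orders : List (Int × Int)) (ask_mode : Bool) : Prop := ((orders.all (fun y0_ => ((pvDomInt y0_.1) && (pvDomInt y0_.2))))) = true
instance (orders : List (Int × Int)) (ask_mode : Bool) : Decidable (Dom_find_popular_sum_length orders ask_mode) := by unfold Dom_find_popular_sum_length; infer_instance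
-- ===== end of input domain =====

-- B replaces A's forward pass that rebuilds a price list (then sums it) by a reversed
-- scan with a running (sum, count) accumulator that stops at the first reset element. Objective: alternative.

-- ===== PORT A =====
def find_popular_sum_length (orders : List (Int × Int)) (ask_mode : Bool) : Int × Int :=
  let ask_volume : Int := 0
  let prices : List Int := orders.foldl (fun prices pv =>
    if ((pv.2 < ask_volume) && ask_mode) || ((pv.2 > ask_volume) && !ask_mode) then
      [pv.1]
    else if pv.2 == ask_volume then
      prices ++ [pv.1]
    else prices) []
  (prices.sum, (prices.length : Int))

-- ===== PORT B =====
def pvAltLoop (l : List (Int × Int)) (ask_mode : Bool) (total count : Int) : Int × Int :=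
  match l with
  | [] => (total, count)
  | (p, v) :: rest =>
    if (v < 0 && ask_mode) || (v > 0 && !ask_mode) then
      (total + p, count + 1)
    else if v == 0 then
      pvAltLoop rest ask_mode (total + p) (count + 1)
    else
      pvAltLoop rest ask_mode total count

def find_popular_sum_length_alt (orders : List (Int × Int)) (ask_mode : Bool) : Int × Int :=
  pvAltLoop orders.reverse ask_mode 0 0

-- ===== PRECONDITION & SPEC =====
def Spec_find_popular_sum_length (orders : List (Int × Int)) (ask_mode : Bool) (out : Int × Int) : Prop := out = find_popular_sum_length_alt orders ask_mode
instance (orders : List (Int × Int)) (ask_mode : Bool) (out : Int × Int) : Decidable (Spec_find_popular_sum_length orders ask_mode out) := by unfold Spec_find_popular_sum_length; infer_instance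

-- ===== CLAIM (what is proved, stated in full; the proofs are below) =====
def Claim_equal_find_popular_sum_length : Prop := ∀ (orders : List (Int × Int)) (ask_mode : Bool), Dom_find_popular_sum_length orders ask_mode → Spec_find_popular_sum_length orders ask_mode (find_popular_sum_length orders ask_mode)

-- ===== LEMMAS AND PROOFS =====

-- A's loop body, abbreviated for the lemmas below.
def pvStepA (ask_mode : Bool) (prices : List Int) (pv : Int × Int) : List Int :=
  if ((pv.2 < (0 : Int)) && ask_mode) || ((pv.2 > (0 : Int)) && !ask_mode) then
    [pv.1]
  else if pv.2 == (0 : Int) then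
    prices ++ [pv.1]
  else prices

-- Key invariant: B's backward loop with accumulators computes A's foldl result's sum and length.
theorem pvAltLoop_eq_foldl (ask_mode : Bool) (l : List (Int × Int)) :
    ∀ total count : Int,
      pvAltLoop l.reverse ask_mode total count =
        (total + (l.foldl (pvStepA ask_mode) []).sum,
         count + ((l.foldl (pvStepA ask_mode) []).length : Int)) := by
  induction l using List.reverseRecOn with
  | nil => intro total count; simp [pvAltLoop]
  | append_singleton l' x ih =>
    intro total count
    obtain ⟨p, v⟩ := x
    rw [List.reverse_append]
    simp only [List.reverse_singleton, List.singleton_append, List.foldl_append, List.foldl_cons,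
      List.foldl_nil]
    by_cases h1 : ((v < (0 : Int)) && ask_mode) || ((v > (0 : Int)) && !ask_mode)
    · simp [pvAltLoop, pvStepA, h1]
    · by_cases h2 : v = 0
      · subst h2
        have hc : (((0:Int) < 0 && ask_mode) || ((0:Int) > 0 && !ask_mode)) = false := by simp
        rw [show pvAltLoop ((p, (0:Int)) :: l'.reverse) ask_mode total count =
              pvAltLoop l'.reverse ask_mode (total + p) (count + 1) by
            simp [pvAltLoop, hc]]
        rw [ih]
        simp only [pvStepA, hc]
        simp only [Bool.false_eq_true, if_false, BEq.rfl, if_true, List.sum_append,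
          List.length_append, List.sum_cons, List.sum_nil, List.length_cons, List.length_nil]
        simp only [Prod.mk.injEq]; constructor <;> push_cast <;> ring
      · have hv : (v == (0:Int)) = false := by simp [h2]
        rw [show pvAltLoop ((p, v) :: l'.reverse) ask_mode total count =
              pvAltLoop l'.reverse ask_mode total count by
            simp [pvAltLoop, h1, hv]]
        rw [ih]
        simp only [pvStepA, h1, hv, Bool.false_eq_true, if_false]

-- ===== VERDICT (by name: the statement is the Claim_ definition above) =====
theorem find_popular_sum_length_spec : Claim_equal_find_popular_sum_length := by
  intro orders ask_mode _
  show find_popular_sum_length orders ask_mode = find_popular_sum_length_alt orders ask_mode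
  have h : find_popular_sum_length_alt orders ask_mode =
      pvAltLoop orders.reverse ask_mode 0 0 := rfl
  rw [h, pvAltLoop_eq_foldl]
  show ((orders.foldl (pvStepA ask_mode) []).sum, ((orders.foldl (pvStepA ask_mode) []).length : Int)) = _
  simp
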